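-- pv_equiv track=rewrite | github.com/Svetlanda/Python_DQ_learn | Shumeika_DQ_Task4.2.py | get_max_value_from_list_of_dict
-- ===== SOURCE A (Python) =====
-- def get_max_value_from_list_of_dict(v_list):
--     dict_rn = 1
--     dict_max_result = {}
--     tmp_dict = {}
--     for dicts in v_list:
--         for key, value in dicts.items():  # for each dictionary in random_list
--             is_updated = False  # indicator of updated value
--             if key not in tmp_dict:  # if it first or unique key
--                 tmp_dict[key] = (value, dict_rn, is_updated)  # just insert as is
--             else:  # means that key has already been inserted
--                 is_updated = True  # means that value need to be updated OR index should be updated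
--                 if value > tmp_dict[key][0]:
--                     tmp_dict.update({key: (value, dict_rn, is_updated)})  # update value
--                 else:
--                     tmp_dict.update({key: (tmp_dict[key][0], tmp_dict[key][1], is_updated)})  # update index
--         dict_rn += 1
--     # Creation result dictionary with max value for each key:
--     for key, value in tmp_dict.items():
--         if value[2]:  # If returns TRUE. Means that value has been updated for this key
--             dict_max_result.update({key + '_' + str(value[1]): value[0]})  # add index for key name
--         else:
--             dict_max_result.update({key: value[0]})  # just leave key name as is
--     return dict_max_result
-- ===== SOURCE B (Python) =====
-- def get_max_value_from_list_of_dict(v_list):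
--     # Gather-then-reduce: one pass grouping key -> [(value, position)], then reduce each group.
--     groups = {}
--     for pos, dicts in enumerate(v_list, start=1):
--         for key, value in dicts.items():
--             groups.setdefault(key, []).append((value, pos))
--     result = {}
--     for key, occ in groups.items():
--         mx = max(v for v, p in occ)
--         first_pos = min(p for v, p in occ if v == mx)
--         if len(occ) > 1:
--             result[key + '_' + str(first_pos)] = mx
--         else:
--             result[key] = mx
--     return result
-- ===== Notes on version B (the rewrite author's own statement) =====
-- stated objective: alternative
-- what changed: Replaces A's single-pass per-key running (max, index, updated-flag) accumulator with a gather-then-reduce decomposition: one pass groups key -> [(value, position)] via enumerate/setdefault, a second pass reduces each group with max/min comprehensions and the group-length rename test.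
import Mathlib
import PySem

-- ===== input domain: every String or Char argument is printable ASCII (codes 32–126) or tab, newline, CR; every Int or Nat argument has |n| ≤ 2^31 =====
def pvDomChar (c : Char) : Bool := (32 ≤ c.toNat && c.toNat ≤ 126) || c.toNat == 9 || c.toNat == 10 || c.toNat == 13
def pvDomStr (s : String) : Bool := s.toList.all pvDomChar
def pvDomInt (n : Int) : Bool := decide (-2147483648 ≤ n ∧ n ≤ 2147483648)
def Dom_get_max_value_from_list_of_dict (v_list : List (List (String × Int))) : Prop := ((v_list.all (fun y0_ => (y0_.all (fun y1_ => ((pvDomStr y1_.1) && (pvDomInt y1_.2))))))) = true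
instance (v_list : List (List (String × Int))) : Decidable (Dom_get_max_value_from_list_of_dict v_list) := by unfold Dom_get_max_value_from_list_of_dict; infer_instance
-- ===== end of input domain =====

-- B replaces A's running per-key (max, index, updated) accumulator by a gather-then-reduce
-- decomposition (group key -> [(value, position)], then reduce each group); objective: alternative.

-- ===== PORT A =====
-- one step of A's inner loop: t = (key, value, dict_rn)
def pvAIns (tmp : PySem.Dict String (Int × Int × Bool)) (t : String × Int × Int) :
    PySem.Dict String (Int × Int × Bool) :=
  match tmp.get? t.1 with
  | none => tmp.insert t.1 (t.2.1, t.2.2, false)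
  | some prev =>
      if t.2.1 > prev.1 then tmp.insert t.1 (t.2.1, t.2.2, true)
      else tmp.insert t.1 (prev.1, prev.2.1, true)

def get_max_value_from_list_of_dict (v_list : List (List (String × Int))) : List (String × Int) :=
  let fin := v_list.foldl
    (fun st dicts => (st.1 + 1, dicts.foldl (fun tmp kv => pvAIns tmp (kv.1, kv.2, st.1)) st.2))
    ((1 : Int), PySem.Dict.empty)
  let res := fin.2.items.foldl
    (fun r it =>
      if it.2.2.2 then r.insert (it.1 ++ "_" ++ PySem.Int.toStr it.2.2.1) it.2.1
      else r.insert it.1 it.2.1)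
    PySem.Dict.empty
  res.items

-- ===== PORT B =====
-- groups.setdefault(key, []).append((value, pos)) : t = (key, value, pos)
def pvBIns (g : PySem.Dict String (List (Int × Int))) (t : String × Int × Int) :
    PySem.Dict String (List (Int × Int)) :=
  g.modify t.1 [] (· ++ [(t.2.1, t.2.2)])

def get_max_value_from_list_of_dict_alt (v_list : List (List (String × Int))) : List (String × Int) :=
  let groups := (PySem.List.enumerate v_list 1).foldl
    (fun g pd => pd.2.foldl (fun g kv => pvBIns g (kv.1, kv.2, pd.1)) g)
    PySem.Dict.empty
  let res := groups.items.foldl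
    (fun r it =>
      match PySem.List.max? (it.2.map (·.1)) (fun x => x) with
      | none => r
      | some mx =>
        match PySem.List.min? ((it.2.filter (fun vp => vp.1 == mx)).map (·.2)) (fun x => x) with
        | none => r
        | some fp =>
          if it.2.length > 1 then r.insert (it.1 ++ "_" ++ PySem.Int.toStr fp) mx
          else r.insert it.1 mx)
    PySem.Dict.empty
  res.items

-- ===== PRECONDITION & SPEC =====
def Spec_get_max_value_from_list_of_dict (v_list : List (List (String × Int))) (out : List (String × Int)) : Prop := out = get_max_value_from_list_of_dict_alt v_list
instance (v_list : List (List (String × Int))) (out : List (String × Int)) : Decidable (Spec_get_max_value_from_list_of_dict v_list out) := by unfold Spec_get_max_value_from_list_of_dict; infer_instance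

-- ===== CLAIM (what is proved, stated in full; the proofs are below) =====
def Claim_equal_get_max_value_from_list_of_dict : Prop := ∀ (v_list : List (List (String × Int))), Dom_get_max_value_from_list_of_dict v_list → Spec_get_max_value_from_list_of_dict v_list (get_max_value_from_list_of_dict v_list)

-- ===== LEMMAS AND PROOFS =====

-- the flattened stream of (key, value, dict position) triples both loops traverse
def pvSeq : Int → List (List (String × Int)) → List (String × Int × Int)
  | _, [] => []
  | n, d :: ds => d.map (fun kv => (kv.1, kv.2, n)) ++ pvSeq (n + 1) ds

-- occurrences of key k in a stream, as (value, position) pairs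
def pvOccs (s : List (String × Int × Int)) (k : String) : List (Int × Int) :=
  (s.filter (fun t => t.1 == k)).map (·.2)

theorem pvFlattenA (ds : List (List (String × Int))) : ∀ (n : Int) (tmp : PySem.Dict String (Int × Int × Bool)),
    (ds.foldl (fun st dicts => (st.1 + 1, dicts.foldl (fun t kv => pvAIns t (kv.1, kv.2, st.1)) st.2)) (n, tmp)).2
      = (pvSeq n ds).foldl pvAIns tmp := by
  induction ds with
  | nil => intro n tmp; simp [pvSeq]
  | cons d ds ih =>
      intro n tmp
      simp only [List.foldl_cons, pvSeq, List.foldl_append, List.foldl_map, ih]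

theorem pvFlattenB (ds : List (List (String × Int))) : ∀ (n : Int) (g : PySem.Dict String (List (Int × Int))),
    (PySem.List.enumerate ds n).foldl (fun g pd => pd.2.foldl (fun g kv => pvBIns g (kv.1, kv.2, pd.1)) g) g
      = (pvSeq n ds).foldl pvBIns g := by
  induction ds with
  | nil => intro n g; simp [pvSeq, PySem.List.enumerate_nil]
  | cons d ds ih =>
      intro n g
      simp only [PySem.List.enumerate_cons, List.foldl_cons, pvSeq, List.foldl_append, List.foldl_map, ih]

-- A's per-key state transition, as a function of the previous lookup
def pvStepO (st : Option (Int × Int × Bool)) (vp : Int × Int) : Option (Int × Int × Bool) :=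
  some (match st with
    | none => (vp.1, vp.2, false)
    | some prev => if vp.1 > prev.1 then (vp.1, vp.2, true) else (prev.1, prev.2.1, true))

theorem pvOccs_cons (t : String × Int × Int) (s : List (String × Int × Int)) (k : String) :
    pvOccs (t :: s) k = if t.1 == k then t.2 :: pvOccs s k else pvOccs s k := by
  simp only [pvOccs, List.filter_cons]
  by_cases h : t.1 == k <;> simp [h]

theorem pvAIns_get?_step (d : PySem.Dict String (Int × Int × Bool)) (t : String × Int × Int) (k : String) :
    (pvAIns d t).get? k = if t.1 == k then pvStepO (d.get? k) t.2 else d.get? k := by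
  unfold pvAIns pvStepO
  by_cases h : k = t.1
  · subst h
    cases hg : d.get? t.1 with
    | none => simp [PySem.Dict.get?_insert_self]
    | some prev => simp; split_ifs <;> simp [PySem.Dict.get?_insert_self]
  · have h2 : (t.1 == k) = false := by simp; exact fun e => h e.symm
    cases hg : d.get? t.1 with
    | none => simp [h2, PySem.Dict.get?_insert_of_ne _ _ h]
    | some prev => simp [h2]; split_ifs <;> simp [PySem.Dict.get?_insert_of_ne _ _ h]

theorem pvA_get? (s : List (String × Int × Int)) : ∀ (d : PySem.Dict String (Int × Int × Bool)) (k : String),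
    (s.foldl pvAIns d).get? k = (pvOccs s k).foldl pvStepO (d.get? k) := by
  induction s with
  | nil => intro d k; simp [pvOccs]
  | cons t s ih =>
      intro d k
      rw [List.foldl_cons, ih, pvOccs_cons, pvAIns_get?_step]
      by_cases h : t.1 == k <;> simp [h]
def pvAVal (d : PySem.Dict String (Int × Int × Bool)) (t : String × Int × Int) : Int × Int × Bool :=
  match d.get? t.1 with
  | none => (t.2.1, t.2.2, false)
  | some prev => if t.2.1 > prev.1 then (t.2.1, t.2.2, true) else (prev.1, prev.2.1, true)

theorem pvAIns_eq : pvAIns = fun d t => d.insert t.1 (pvAVal d t) := by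
  funext d t
  unfold pvAIns pvAVal
  cases d.get? t.1 with
  | none => rfl
  | some prev => by_cases h : t.2.1 > prev.1 <;> simp [h]

theorem pvBIns_eq : pvBIns = fun (d : PySem.Dict String (List (Int × Int))) (p : String × Int × Int) => d.modify p.1 [] (· ++ [p.2]) := by
  funext d p; simp [pvBIns]

theorem pvB_getD (s : List (String × Int × Int)) (g : PySem.Dict String (List (Int × Int))) (k : String) :
    (s.foldl pvBIns g).getD k [] = g.getD k [] ++ pvOccs s k := by
  rw [pvBIns_eq]
  exact PySem.Dict.getD_foldl_modify_append s g k

theorem pvA_keys (s : List (String × Int × Int)) :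
    ((s.foldl pvAIns PySem.Dict.empty).keys) = PySem.Set.ofList (s.map (·.1)) := by
  rw [pvAIns_eq]
  rw [PySem.Dict.keys_foldl_insert_key, PySem.Set.ofList_eq_foldl]
  rfl

theorem pvB_keys (s : List (String × Int × Int)) :
    ((s.foldl pvBIns PySem.Dict.empty).keys) = PySem.Set.ofList (s.map (·.1)) := by
  rw [pvBIns_eq]
  rw [PySem.Dict.keys_foldl_modify_key, PySem.Set.ofList_eq_foldl]
  rfl

theorem pvA_nodup (s : List (String × Int × Int)) :
    ((s.foldl pvAIns PySem.Dict.empty).keys).Nodup := by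
  rw [pvAIns_eq]
  exact PySem.Dict.nodup_keys_foldl_insert_key s (·.1) _ _ PySem.Dict.nodup_keys_empty

theorem pvB_nodup (s : List (String × Int × Int)) :
    ((s.foldl pvBIns PySem.Dict.empty).keys).Nodup := by
  rw [pvBIns_eq]
  exact PySem.Dict.nodup_keys_foldl_modify_key s (·.1) _ _ _ PySem.Dict.nodup_keys_empty
-- the gather-side reduction of one group, as the running (max, its first position)
def pvRed (cur : Int × Int) (rest : List (Int × Int)) : Int × Int :=
  rest.foldl (fun mq vp => if vp.1 > mq.1 then (vp.1, vp.2) else mq) cur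

theorem pvRed_cons (c vp : Int × Int) (rs : List (Int × Int)) :
    pvRed c (vp :: rs) = pvRed (if vp.1 > c.1 then vp else c) rs := rfl

theorem pvStepO_fold (rest : List (Int × Int)) : ∀ (v p : Int) (b : Bool),
    rest.foldl pvStepO (some (v, p, b)) =
      some ((pvRed (v, p) rest).1, (pvRed (v, p) rest).2, b || !rest.isEmpty) := by
  induction rest with
  | nil => intro v p b; simp [pvRed]
  | cons vp rs ih =>
      intro v p b
      rw [List.foldl_cons]
      have hstep : pvStepO (some (v, p, b)) vp =
          some (if vp.1 > v then (vp.1, vp.2, true) else (v, p, true)) := by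
        simp [pvStepO]
      rw [hstep]
      have hred : pvRed (v, p) (vp :: rs) = pvRed (if vp.1 > v then (vp.1, vp.2) else (v, p)) rs := by
        rw [pvRed_cons]
      by_cases h : vp.1 > v <;> simp [h, ih, hred]

theorem pvRed_mem (rest : List (Int × Int)) : ∀ c, pvRed c rest ∈ c :: rest := by
  induction rest with
  | nil => intro c; simp [pvRed]
  | cons vp rs ih =>
      intro c
      rw [pvRed_cons]
      rcases List.mem_cons.mp (ih (if vp.1 > c.1 then vp else c)) with h | h
      · rw [h]; split_ifs <;> simp
      · simp [h]

theorem pvRed_max (rest : List (Int × Int)) : ∀ c, ∀ vp ∈ c :: rest, vp.1 ≤ (pvRed c rest).1 := by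
  induction rest with
  | nil => intro c vp h; simp at h; simp [pvRed, h]
  | cons x rs ih =>
      intro c vp h
      rw [pvRed_cons]
      have hc : c.1 ≤ (if x.1 > c.1 then x else c).1 := by split_ifs with h' <;> omega
      have hx : x.1 ≤ (if x.1 > c.1 then x else c).1 := by split_ifs with h' <;> omega
      have hcm := ih (if x.1 > c.1 then x else c) _ (List.mem_cons_self)
      rcases List.mem_cons.mp h with h1 | h1
      · subst h1; exact le_trans hc hcm
      · rcases List.mem_cons.mp h1 with h2 | h2
        · subst h2; exact le_trans hx hcm
        · exact ih _ vp (List.mem_cons_of_mem _ h2)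

theorem pvRed_firstpos (rest : List (Int × Int)) : ∀ c,
    ((c :: rest).Pairwise (fun a b => a.2 ≤ b.2)) →
    ∀ vp ∈ c :: rest, vp.1 = (pvRed c rest).1 → (pvRed c rest).2 ≤ vp.2 := by
  induction rest with
  | nil => intro c _ vp h _; simp at h; simp [pvRed, h]
  | cons x rs ih =>
      intro c hsort vp hmem heq
      rw [pvRed_cons] at heq ⊢
      have hcx : c.2 ≤ x.2 := (List.pairwise_cons.mp hsort).1 x (List.mem_cons_self)
      have hsort' : ((if x.1 > c.1 then x else c) :: rs).Pairwise (fun a b => a.2 ≤ b.2) := by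
        rcases List.pairwise_cons.mp hsort with ⟨hc, hrest⟩
        rcases List.pairwise_cons.mp hrest with ⟨hx, hrs⟩
        refine List.pairwise_cons.mpr ⟨?_, hrs⟩
        intro y hy
        split_ifs with h'
        · exact hx y hy
        · exact hc y (List.mem_cons_of_mem _ hy)
      rcases List.mem_cons.mp hmem with h1 | h1
      · -- vp = c
        subst h1
        by_cases h' : x.1 > vp.1
        · -- c was discarded: then vp.1 = M is impossible (x.1 ≤ M and x.1 > vp.1)
          exfalso
          have hxle := pvRed_max rs (if x.1 > vp.1 then x else vp) x
            (by rw [if_pos h']; exact List.mem_cons_self)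
          omega
        · exact ih _ hsort' vp (by rw [if_neg h']; exact List.mem_cons_self) heq
      · rcases List.mem_cons.mp h1 with h2 | h2
        · -- vp = x
          subst h2
          by_cases h' : vp.1 > c.1
          · exact ih _ hsort' vp (by rw [if_pos h']; exact List.mem_cons_self) heq
          · -- x was discarded: then c.1 = M as well, so F ≤ c.2 ≤ x.2
            have hle := pvRed_max rs (if vp.1 > c.1 then vp else c) (if vp.1 > c.1 then vp else c)
              (List.mem_cons_self)
            rw [if_neg h'] at hle heq hsort'
            rw [if_neg h']
            have hcx' : c.2 ≤ vp.2 := (List.pairwise_cons.mp hsort).1 vp (List.mem_cons_self)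
            have hceq : c.1 = (pvRed c rs).1 := by omega
            exact le_trans (ih c hsort' c (List.mem_cons_self) hceq) hcx'
        · exact ih _ hsort' vp (List.mem_cons_of_mem _ h2) heq
theorem pvRed_fst (rest : List (Int × Int)) : ∀ c : Int × Int,
    (pvRed c rest).1 = (rest.map (·.1)).foldl max c.1 := by
  induction rest with
  | nil => intro c; simp [pvRed]
  | cons x rs ih =>
      intro c
      rw [pvRed_cons, List.map_cons, List.foldl_cons, ih]
      congr 1
      split_ifs with h' <;> omega

theorem pvFoldlMin_mem (t : List Int) : ∀ x : Int, t.foldl min x ∈ x :: t := by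
  induction t with
  | nil => intro x; simp
  | cons y ys ih =>
      intro x
      rw [List.foldl_cons]
      rcases List.mem_cons.mp (ih (min x y)) with h | h
      · rw [h]
        rcases min_choice x y with h' | h' <;> rw [h'] <;> simp
      · simp [h]

theorem pvFoldlMin_le (t : List Int) : ∀ x : Int, ∀ y ∈ x :: t, t.foldl min x ≤ y := by
  induction t with
  | nil => intro x y h; simp at h; simp [h]
  | cons z zs ih =>
      intro x y h
      rw [List.foldl_cons]
      rcases List.mem_cons.mp h with h1 | h1
      · rw [h1]
        exact le_trans (ih (min x z) _ (List.mem_cons_self)) (min_le_left _ _)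
      · rcases List.mem_cons.mp h1 with h2 | h2
        · rw [h2]
          exact le_trans (ih (min x z) _ (List.mem_cons_self)) (min_le_right _ _)
        · exact ih _ y (List.mem_cons_of_mem _ h2)

theorem pvMin_eq (l : List Int) (F : Int) (h1 : F ∈ l) (h2 : ∀ y ∈ l, F ≤ y) :
    PySem.List.min? l (fun x => x) = some F := by
  cases l with
  | nil => simp at h1
  | cons x t =>
      rw [PySem.List.min?_id_cons]
      congr 1
      have ha := pvFoldlMin_le t x F h1
      have hb := h2 _ (pvFoldlMin_mem t x)
      omega

theorem pvMax_eq (occ : List (Int × Int)) (c : Int × Int) :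
    PySem.List.max? ((c :: occ).map (·.1)) (fun x => x) = some (pvRed c occ).1 := by
  rw [List.map_cons, PySem.List.max?_id_cons, pvRed_fst]

theorem pvSeq_pos_le (ds : List (List (String × Int))) : ∀ (n : Int), ∀ t ∈ pvSeq n ds, n ≤ t.2.2 := by
  induction ds with
  | nil => intro n t h; simp [pvSeq] at h
  | cons d ds ih =>
      intro n t h
      rcases List.mem_append.mp h with h1 | h1
      · rcases List.mem_map.mp h1 with ⟨kv, _, hkv⟩
        subst hkv; simp
      · have := ih (n + 1) t h1; omega

theorem pvSeq_sorted (ds : List (List (String × Int))) : ∀ (n : Int),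
    (pvSeq n ds).Pairwise (fun a b => a.2.2 ≤ b.2.2) := by
  induction ds with
  | nil => intro n; simp [pvSeq]
  | cons d ds ih =>
      intro n
      refine List.pairwise_append.mpr ⟨?_, ih (n + 1), ?_⟩
      · exact List.pairwise_map.mpr (List.pairwise_of_forall (fun _ _ => le_rfl))
      · intro a ha b hb
        rcases List.mem_map.mp ha with ⟨kv, _, hkv⟩
        have := pvSeq_pos_le ds (n + 1) b hb
        subst hkv; simp; omega

theorem pvOccs_sorted (s : List (String × Int × Int))
    (hs : s.Pairwise (fun a b => a.2.2 ≤ b.2.2)) (k : String) :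
    (pvOccs s k).Pairwise (fun a b => a.2 ≤ b.2) := by
  unfold pvOccs
  refine List.pairwise_map.mpr ?_
  exact List.Pairwise.sublist List.filter_sublist hs
theorem pvKeyStep (c : Int × Int) (rest : List (Int × Int))
    (hs : (c :: rest).Pairwise (fun a b => a.2 ≤ b.2)) (k : String) (r : PySem.Dict String Int) :
    (if (((c :: rest).foldl pvStepO none).getD (0, 0, false)).2.2 then
        r.insert (k ++ "_" ++ PySem.Int.toStr (((c :: rest).foldl pvStepO none).getD (0, 0, false)).2.1)
          (((c :: rest).foldl pvStepO none).getD (0, 0, false)).1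
      else r.insert k (((c :: rest).foldl pvStepO none).getD (0, 0, false)).1)
    = (match PySem.List.max? ((c :: rest).map (·.1)) (fun x => x) with
       | none => r
       | some mx =>
         match PySem.List.min? (((c :: rest).filter (fun vp => vp.1 == mx)).map (·.2)) (fun x => x) with
         | none => r
         | some fp =>
           if (c :: rest).length > 1 then r.insert (k ++ "_" ++ PySem.Int.toStr fp) mx
           else r.insert k mx) := by
  have hfold : (c :: rest).foldl pvStepO none =
      some ((pvRed c rest).1, (pvRed c rest).2, false || !rest.isEmpty) := by
    rw [List.foldl_cons]
    have h0 : pvStepO none c = some (c.1, c.2, false) := by simp [pvStepO]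
    rw [h0, pvStepO_fold]
  have hmax := pvMax_eq rest c
  have hminmem : (pvRed c rest).2 ∈ ((c :: rest).filter (fun vp => vp.1 == (pvRed c rest).1)).map (·.2) :=
    List.mem_map.mpr ⟨pvRed c rest, List.mem_filter.mpr ⟨pvRed_mem rest c, by simp⟩, rfl⟩
  have hminle : ∀ y ∈ ((c :: rest).filter (fun vp => vp.1 == (pvRed c rest).1)).map (·.2),
      (pvRed c rest).2 ≤ y := by
    intro y hy
    rcases List.mem_map.mp hy with ⟨vp, hvp, hy'⟩
    rcases List.mem_filter.mp hvp with ⟨hvpm, hvpe⟩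
    subst hy'
    exact pvRed_firstpos rest c hs vp hvpm (by simpa using hvpe)
  have hmin := pvMin_eq _ _ hminmem hminle
  rw [hfold, hmax]
  simp only [Option.getD_some]
  rw [hmin]
  cases rest with
  | nil => simp
  | cons x rs => simp
theorem pvOccs_ne_nil (s : List (String × Int × Int)) (k : String) (h : k ∈ s.map (·.1)) :
    pvOccs s k ≠ [] := by
  rcases List.mem_map.mp h with ⟨t, ht, hk⟩
  unfold pvOccs
  intro hnil
  rw [List.map_eq_nil_iff, List.filter_eq_nil_iff] at hnil
  exact hnil t ht (by simp [hk])

-- ===== VERDICT (by name: the statement is the Claim_ definition above) =====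
theorem get_max_value_from_list_of_dict_spec : Claim_equal_get_max_value_from_list_of_dict := by
  intro v_list _
  unfold Spec_get_max_value_from_list_of_dict
  unfold get_max_value_from_list_of_dict get_max_value_from_list_of_dict_alt
  simp only [pvFlattenA, pvFlattenB]
  apply congrArg PySem.Dict.items
  rw [PySem.Dict.items_eq_map_keys _ (pvA_nodup (pvSeq 1 v_list)) ((0 : Int), (0 : Int), false),
      PySem.Dict.items_eq_map_keys _ (pvB_nodup (pvSeq 1 v_list)) ([] : List (Int × Int)),
      pvA_keys, pvB_keys, List.foldl_map, List.foldl_map]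
  apply PySem.List.foldl_congr_mem'
  intro k hk r
  have hkmem : k ∈ (pvSeq 1 v_list).map (·.1) := (PySem.Set.mem_ofList _ _).mp hk
  have hgA : (((pvSeq 1 v_list).foldl pvAIns PySem.Dict.empty).getD k ((0 : Int), (0 : Int), false))
      = ((pvOccs (pvSeq 1 v_list) k).foldl pvStepO none).getD ((0 : Int), (0 : Int), false) := by
    rw [PySem.Dict.getD_eq_get?_getD, pvA_get?, PySem.Dict.get?_empty]
  have hgB : (((pvSeq 1 v_list).foldl pvBIns PySem.Dict.empty).getD k ([] : List (Int × Int)))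
      = pvOccs (pvSeq 1 v_list) k := by
    rw [pvB_getD, PySem.Dict.getD_empty, List.nil_append]
  simp only [hgA, hgB]
  cases hocc : pvOccs (pvSeq 1 v_list) k with
  | nil => exact absurd hocc (pvOccs_ne_nil _ _ hkmem)
  | cons c rest =>
      exact pvKeyStep c rest (hocc ▸ pvOccs_sorted _ (pvSeq_sorted v_list 1) k) k r
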